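-- pv_equiv track=rewrite | github.com/NischalGrg5555/SEO-Optima | dashboard/views.py | _compute_header_stats
-- ===== SOURCE A (Python) =====
-- def _compute_header_stats(headers_data):
--     """Compute header counts and grouped text from stored header JSON."""
--     counts = {
--         'H1': 0,
--         'H2': 0,
--         'H3': 0,
--         'H4': 0,
--         'H5': 0,
--         'H6': 0,
--     }
--     grouped = {
--         'h1': [],
--         'h2': [],
--         'h3': [],
--         'h4': [],
--         'h5': [],
--         'h6': [],
--     }
--
--     if not isinstance(headers_data, list):
--         return 0, counts, grouped
--
--     for header in headers_data:
--         if not isinstance(header, dict):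
--             continue
--
--         level = str(header.get('level') or header.get('tag') or '').upper()
--         text = str(header.get('text') or '').strip()
--
--         if level in counts and text:
--             counts[level] += 1
--             grouped[level.lower()].append(text)
--
--     total_headers = sum(counts.values())
--     return total_headers, counts, grouped
-- ===== SOURCE B (Python) =====
-- def _compute_header_stats(headers_data):
--     """Compute header counts and grouped text from stored header JSON."""
--     levels = ['h1', 'h2', 'h3', 'h4', 'h5', 'h6']
--
--     if isinstance(headers_data, list):
--         pairs = [
--             (str(h.get('level') or h.get('tag') or '').upper(),
--              str(h.get('text') or '').strip())
--             for h in headers_data if isinstance(h, dict)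
--         ]
--     else:
--         pairs = []
--
--     grouped = {k: [t for l, t in pairs if l == k.upper() and t] for k in levels}
--     counts = {k.upper(): len(v) for k, v in grouped.items()}
--     return sum(counts.values()), counts, grouped
-- ===== Notes on version B (the rewrite author's own statement) =====
-- stated objective: simpler
-- what changed: B replaces A's single loop mutating two parallel dicts with staged passes: a comprehension extracting (level, text) pairs, then a per-key filtering comprehension building grouped, with counts and the total derived from grouped afterwards.
import Mathlib
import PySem

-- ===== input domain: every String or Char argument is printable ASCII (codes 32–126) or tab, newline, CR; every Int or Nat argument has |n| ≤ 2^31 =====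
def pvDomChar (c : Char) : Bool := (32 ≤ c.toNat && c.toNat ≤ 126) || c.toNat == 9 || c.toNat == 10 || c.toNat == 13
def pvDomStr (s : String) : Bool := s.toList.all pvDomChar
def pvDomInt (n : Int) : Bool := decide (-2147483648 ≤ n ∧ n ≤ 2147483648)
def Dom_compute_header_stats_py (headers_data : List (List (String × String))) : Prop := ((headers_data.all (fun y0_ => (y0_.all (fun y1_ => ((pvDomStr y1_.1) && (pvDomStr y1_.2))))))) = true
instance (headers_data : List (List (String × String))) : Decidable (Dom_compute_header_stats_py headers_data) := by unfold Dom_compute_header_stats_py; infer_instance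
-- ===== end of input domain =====

-- B replaces A's single loop that mutates two parallel dicts by staged passes: one comprehension
-- extracting the (level, text) pairs, then one filtering pass per fixed key to build grouped,
-- with counts and the total derived from grouped afterwards; objective: simpler.

-- `x or y` for an optional string x with a string fallback y (falsy = None or "")
def pvOrStr (a : Option String) (fb : String) : String :=
  match a with
  | some s => if s == "" then fb else s
  | none => fb

-- the two lines both Pythons share verbatim:
--   level = str(header.get('level') or header.get('tag') or '').upper()
--   text  = str(header.get('text') or '').strip()
def pvLevelText (header : List (String × String)) : String × String :=
  let d := PySem.Dict.ofList header
  (PySem.Str.upper (pvOrStr (d.get? "level") (pvOrStr (d.get? "tag") "")),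
   PySem.Str.strip (pvOrStr (d.get? "text") ""))

-- ===== PORT A =====
-- loop body of A: conditional update of both the counts dict and the grouped dict
def pvStepA (st : PySem.Dict String Int × PySem.Dict String (List String))
    (header : List (String × String)) :
    PySem.Dict String Int × PySem.Dict String (List String) :=
  let lt := pvLevelText header
  if st.1.contains lt.1 && !(lt.2 == "") then
    (st.1.modify lt.1 0 (· + 1), st.2.modify (PySem.Str.lower lt.1) [] (· ++ [lt.2]))
  else st

-- the isinstance guards of A are vacuous under the typed encoding (the argument IS a list of dicts)
def compute_header_stats_py (headers_data : List (List (String × String))) :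
    Int × (List (String × Int)) × (List (String × List String)) :=
  let counts0 : PySem.Dict String Int :=
    PySem.Dict.ofList [("H1", 0), ("H2", 0), ("H3", 0), ("H4", 0), ("H5", 0), ("H6", 0)]
  let grouped0 : PySem.Dict String (List String) :=
    PySem.Dict.ofList [("h1", []), ("h2", []), ("h3", []), ("h4", []), ("h5", []), ("h6", [])]
  let st := headers_data.foldl pvStepA (counts0, grouped0)
  (st.1.values.sum, st.1.items, st.2.items)

-- ===== PORT B =====
-- B: the pairs comprehension, then a dict comprehension filtering pairs once per fixed key,
-- then the counts comprehension over grouped; dicts with these distinct literal keys are their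
-- association lists in insertion order, so the comprehensions are List.map.
def compute_header_stats_py_alt (headers_data : List (List (String × String))) :
    Int × (List (String × Int)) × (List (String × List String)) :=
  let levels : List String := ["h1", "h2", "h3", "h4", "h5", "h6"]
  let pairs := headers_data.map pvLevelText
  let grouped : List (String × List String) :=
    levels.map (fun k =>
      (k, (pairs.filter (fun p => p.1 == PySem.Str.upper k && !(p.2 == ""))).map Prod.snd))
  let counts : List (String × Int) :=
    grouped.map (fun p => (PySem.Str.upper p.1, (p.2.length : Int)))
  ((counts.map Prod.snd).sum, counts, grouped)

-- ===== PRECONDITION & SPEC =====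
def Spec_compute_header_stats_py (headers_data : List (List (String × String))) (out : Int × (List (String × Int)) × (List (String × List String))) : Prop := out = compute_header_stats_py_alt headers_data
instance (headers_data : List (List (String × String))) (out : Int × (List (String × Int)) × (List (String × List String))) : Decidable (Spec_compute_header_stats_py headers_data out) := by unfold Spec_compute_header_stats_py; infer_instance

-- ===== CLAIM (what is proved, stated in full; the proofs are below) =====
def Claim_equal_compute_header_stats_py : Prop := ∀ (headers_data : List (List (String × String))), Dom_compute_header_stats_py headers_data → Spec_compute_header_stats_py headers_data (compute_header_stats_py headers_data)

-- ===== LEMMAS AND PROOFS =====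

-- the counts dict / grouped dict of A with six variable values
def pvC (n1 n2 n3 n4 n5 n6 : Int) : PySem.Dict String Int :=
  PySem.Dict.mk [("H1",n1),("H2",n2),("H3",n3),("H4",n4),("H5",n5),("H6",n6)]
def pvG (a1 a2 a3 a4 a5 a6 : List String) : PySem.Dict String (List String) :=
  PySem.Dict.mk [("h1",a1),("h2",a2),("h3",a3),("h4",a4),("h5",a5),("h6",a6)]

-- the per-key text list B extracts
def pvFil (K : String) (hs : List (List (String × String))) : List String :=
  ((hs.map pvLevelText).filter (fun p => p.1 == K && !(p.2 == ""))).map Prod.snd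

lemma pvFil_nil (K : String) : pvFil K [] = [] := rfl

lemma pvFil_cons (K : String) (h : List (String × String)) (hs : List (List (String × String))) :
    pvFil K (h :: hs)
      = (if (pvLevelText h).1 == K && !((pvLevelText h).2 == "") then [(pvLevelText h).2] else [])
        ++ pvFil K hs := by
  simp only [pvFil, List.map_cons, List.filter_cons]
  split_ifs <;> simp

-- A's step with level and text abstracted
def pvStep' (st : PySem.Dict String Int × PySem.Dict String (List String)) (L t : String) :
    PySem.Dict String Int × PySem.Dict String (List String) :=
  if st.1.contains L && !(t == "") then
    (st.1.modify L 0 (· + 1), st.2.modify (PySem.Str.lower L) [] (· ++ [t]))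
  else st

lemma pvStepA_eq (st : PySem.Dict String Int × PySem.Dict String (List String))
    (h : List (String × String)) :
    pvStepA st h = pvStep' st (pvLevelText h).1 (pvLevelText h).2 := rfl

lemma pvStep'_H1 (n1 n2 n3 n4 n5 n6 : Int) (a1 a2 a3 a4 a5 a6 : List String) (t : String)
    (ht : (t == "") = false) :
    pvStep' (pvC n1 n2 n3 n4 n5 n6, pvG a1 a2 a3 a4 a5 a6) "H1" t
      = (pvC (n1+1) n2 n3 n4 n5 n6, pvG (a1 ++ [t]) a2 a3 a4 a5 a6) := by
  unfold pvStep'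
  rw [if_pos (by simp [pvC, ht])]
  dsimp only
  refine Prod.ext ?_ ?_
  · apply PySem.Dict.ext
    rw [PySem.Dict.modify, PySem.Dict.items_insert_of_contains _ _ (by simp [pvC])]
    simp [pvC, PySem.Dict.getD_eq_get?_getD, PySem.Dict.get?_mk_cons]
  · dsimp only
    apply PySem.Dict.ext
    rw [show PySem.Str.lower "H1" = "h1" from by decide, PySem.Dict.modify,
        PySem.Dict.items_insert_of_contains _ _ (by simp [pvG])]
    simp [pvG, PySem.Dict.getD_eq_get?_getD, PySem.Dict.get?_mk_cons]

lemma pvStep'_H2 (n1 n2 n3 n4 n5 n6 : Int) (a1 a2 a3 a4 a5 a6 : List String) (t : String)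
    (ht : (t == "") = false) :
    pvStep' (pvC n1 n2 n3 n4 n5 n6, pvG a1 a2 a3 a4 a5 a6) "H2" t
      = (pvC n1 (n2+1) n3 n4 n5 n6, pvG a1 (a2 ++ [t]) a3 a4 a5 a6) := by
  unfold pvStep'
  rw [if_pos (by simp [pvC, ht])]
  dsimp only
  refine Prod.ext ?_ ?_
  · apply PySem.Dict.ext
    rw [PySem.Dict.modify, PySem.Dict.items_insert_of_contains _ _ (by simp [pvC])]
    simp [pvC, PySem.Dict.getD_eq_get?_getD, PySem.Dict.get?_mk_cons]
  · dsimp only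
    apply PySem.Dict.ext
    rw [show PySem.Str.lower "H2" = "h2" from by decide, PySem.Dict.modify,
        PySem.Dict.items_insert_of_contains _ _ (by simp [pvG])]
    simp [pvG, PySem.Dict.getD_eq_get?_getD, PySem.Dict.get?_mk_cons]

lemma pvStep'_H3 (n1 n2 n3 n4 n5 n6 : Int) (a1 a2 a3 a4 a5 a6 : List String) (t : String)
    (ht : (t == "") = false) :
    pvStep' (pvC n1 n2 n3 n4 n5 n6, pvG a1 a2 a3 a4 a5 a6) "H3" t
      = (pvC n1 n2 (n3+1) n4 n5 n6, pvG a1 a2 (a3 ++ [t]) a4 a5 a6) := by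
  unfold pvStep'
  rw [if_pos (by simp [pvC, ht])]
  dsimp only
  refine Prod.ext ?_ ?_
  · apply PySem.Dict.ext
    rw [PySem.Dict.modify, PySem.Dict.items_insert_of_contains _ _ (by simp [pvC])]
    simp [pvC, PySem.Dict.getD_eq_get?_getD, PySem.Dict.get?_mk_cons]
  · dsimp only
    apply PySem.Dict.ext
    rw [show PySem.Str.lower "H3" = "h3" from by decide, PySem.Dict.modify,
        PySem.Dict.items_insert_of_contains _ _ (by simp [pvG])]
    simp [pvG, PySem.Dict.getD_eq_get?_getD, PySem.Dict.get?_mk_cons]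

lemma pvStep'_H4 (n1 n2 n3 n4 n5 n6 : Int) (a1 a2 a3 a4 a5 a6 : List String) (t : String)
    (ht : (t == "") = false) :
    pvStep' (pvC n1 n2 n3 n4 n5 n6, pvG a1 a2 a3 a4 a5 a6) "H4" t
      = (pvC n1 n2 n3 (n4+1) n5 n6, pvG a1 a2 a3 (a4 ++ [t]) a5 a6) := by
  unfold pvStep'
  rw [if_pos (by simp [pvC, ht])]
  dsimp only
  refine Prod.ext ?_ ?_
  · apply PySem.Dict.ext
    rw [PySem.Dict.modify, PySem.Dict.items_insert_of_contains _ _ (by simp [pvC])]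
    simp [pvC, PySem.Dict.getD_eq_get?_getD, PySem.Dict.get?_mk_cons]
  · dsimp only
    apply PySem.Dict.ext
    rw [show PySem.Str.lower "H4" = "h4" from by decide, PySem.Dict.modify,
        PySem.Dict.items_insert_of_contains _ _ (by simp [pvG])]
    simp [pvG, PySem.Dict.getD_eq_get?_getD, PySem.Dict.get?_mk_cons]

lemma pvStep'_H5 (n1 n2 n3 n4 n5 n6 : Int) (a1 a2 a3 a4 a5 a6 : List String) (t : String)
    (ht : (t == "") = false) :
    pvStep' (pvC n1 n2 n3 n4 n5 n6, pvG a1 a2 a3 a4 a5 a6) "H5" t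
      = (pvC n1 n2 n3 n4 (n5+1) n6, pvG a1 a2 a3 a4 (a5 ++ [t]) a6) := by
  unfold pvStep'
  rw [if_pos (by simp [pvC, ht])]
  dsimp only
  refine Prod.ext ?_ ?_
  · apply PySem.Dict.ext
    rw [PySem.Dict.modify, PySem.Dict.items_insert_of_contains _ _ (by simp [pvC])]
    simp [pvC, PySem.Dict.getD_eq_get?_getD, PySem.Dict.get?_mk_cons]
  · dsimp only
    apply PySem.Dict.ext
    rw [show PySem.Str.lower "H5" = "h5" from by decide, PySem.Dict.modify,
        PySem.Dict.items_insert_of_contains _ _ (by simp [pvG])]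
    simp [pvG, PySem.Dict.getD_eq_get?_getD, PySem.Dict.get?_mk_cons]

lemma pvStep'_H6 (n1 n2 n3 n4 n5 n6 : Int) (a1 a2 a3 a4 a5 a6 : List String) (t : String)
    (ht : (t == "") = false) :
    pvStep' (pvC n1 n2 n3 n4 n5 n6, pvG a1 a2 a3 a4 a5 a6) "H6" t
      = (pvC n1 n2 n3 n4 n5 (n6+1), pvG a1 a2 a3 a4 a5 (a6 ++ [t])) := by
  unfold pvStep'
  rw [if_pos (by simp [pvC, ht])]
  dsimp only
  refine Prod.ext ?_ ?_
  · apply PySem.Dict.ext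
    rw [PySem.Dict.modify, PySem.Dict.items_insert_of_contains _ _ (by simp [pvC])]
    simp [pvC, PySem.Dict.getD_eq_get?_getD, PySem.Dict.get?_mk_cons]
  · dsimp only
    apply PySem.Dict.ext
    rw [show PySem.Str.lower "H6" = "h6" from by decide, PySem.Dict.modify,
        PySem.Dict.items_insert_of_contains _ _ (by simp [pvG])]
    simp [pvG, PySem.Dict.getD_eq_get?_getD, PySem.Dict.get?_mk_cons]


lemma pvStep'_skip (n1 n2 n3 n4 n5 n6 : Int) (a1 a2 a3 a4 a5 a6 : List String) (L t : String)
    (h : ((pvC n1 n2 n3 n4 n5 n6).contains L && !(t == "")) = false) :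
    pvStep' (pvC n1 n2 n3 n4 n5 n6, pvG a1 a2 a3 a4 a5 a6) L t
      = (pvC n1 n2 n3 n4 n5 n6, pvG a1 a2 a3 a4 a5 a6) := by
  rw [pvStep', if_neg (by simp [h])]

lemma pvLoop : ∀ (hs : List (List (String × String))) (n1 n2 n3 n4 n5 n6 : Int)
    (a1 a2 a3 a4 a5 a6 : List String),
    hs.foldl pvStepA (pvC n1 n2 n3 n4 n5 n6, pvG a1 a2 a3 a4 a5 a6)
      = (pvC (n1 + ((pvFil "H1" hs).length : Int)) (n2 + ((pvFil "H2" hs).length : Int))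
             (n3 + ((pvFil "H3" hs).length : Int)) (n4 + ((pvFil "H4" hs).length : Int))
             (n5 + ((pvFil "H5" hs).length : Int)) (n6 + ((pvFil "H6" hs).length : Int)),
         pvG (a1 ++ pvFil "H1" hs) (a2 ++ pvFil "H2" hs) (a3 ++ pvFil "H3" hs)
             (a4 ++ pvFil "H4" hs) (a5 ++ pvFil "H5" hs) (a6 ++ pvFil "H6" hs)) := by
  intro hs
  induction hs with
  | nil => intro n1 n2 n3 n4 n5 n6 a1 a2 a3 a4 a5 a6; simp [pvFil_nil]
  | cons h hs ih =>
    intro n1 n2 n3 n4 n5 n6 a1 a2 a3 a4 a5 a6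
    rw [List.foldl_cons, pvStepA_eq]
    by_cases ht : ((pvLevelText h).2 == "") = false
    · by_cases h1 : (pvLevelText h).1 = "H1"
      · rw [h1, pvStep'_H1 _ _ _ _ _ _ _ _ _ _ _ _ _ ht, ih]
        simp [pvFil_cons, h1, ht, add_assoc]
        rw [Int.add_comm 1]
      · by_cases h2 : (pvLevelText h).1 = "H2"
        · rw [h2, pvStep'_H2 _ _ _ _ _ _ _ _ _ _ _ _ _ ht, ih]
          simp [pvFil_cons, h2, ht, add_assoc]
          rw [Int.add_comm 1]
        · by_cases h3 : (pvLevelText h).1 = "H3"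
          · rw [h3, pvStep'_H3 _ _ _ _ _ _ _ _ _ _ _ _ _ ht, ih]
            simp [pvFil_cons, h3, ht, add_assoc]
            rw [Int.add_comm 1]
          · by_cases h4 : (pvLevelText h).1 = "H4"
            · rw [h4, pvStep'_H4 _ _ _ _ _ _ _ _ _ _ _ _ _ ht, ih]
              simp [pvFil_cons, h4, ht, add_assoc]
              rw [Int.add_comm 1]
            · by_cases h5 : (pvLevelText h).1 = "H5"
              · rw [h5, pvStep'_H5 _ _ _ _ _ _ _ _ _ _ _ _ _ ht, ih]
                simp [pvFil_cons, h5, ht, add_assoc]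
                rw [Int.add_comm 1]
              · by_cases h6 : (pvLevelText h).1 = "H6"
                · rw [h6, pvStep'_H6 _ _ _ _ _ _ _ _ _ _ _ _ _ ht, ih]
                  simp [pvFil_cons, h6, ht, add_assoc]
                  rw [Int.add_comm 1]
                · rw [pvStep'_skip _ _ _ _ _ _ _ _ _ _ _ _ _ _
                      (by simp [pvC]; rintro (h'|h'|h'|h'|h'|h') <;> simp_all), ih]
                  simp [pvFil_cons, h1, h2, h3, h4, h5, h6]
    · rw [pvStep'_skip _ _ _ _ _ _ _ _ _ _ _ _ _ _
            (by simp only [Bool.not_eq_false] at ht; simp [ht]), ih]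
      simp only [Bool.not_eq_false] at ht
      simp [pvFil_cons, ht]

-- ===== VERDICT (by name: the statement is the Claim_ definition above) =====
theorem compute_header_stats_py_spec : Claim_equal_compute_header_stats_py := by
  intro hd _
  unfold Spec_compute_header_stats_py compute_header_stats_py compute_header_stats_py_alt
  simp only []
  rw [show (PySem.Dict.ofList [("H1", (0:Int)), ("H2", 0), ("H3", 0), ("H4", 0), ("H5", 0), ("H6", 0)])
      = pvC 0 0 0 0 0 0 from by decide,
    show (PySem.Dict.ofList [("h1", ([]:List String)), ("h2", []), ("h3", []), ("h4", []), ("h5", []), ("h6", [])])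
      = pvG [] [] [] [] [] [] from by decide,
    pvLoop]
  simp only [List.map_cons, List.map_nil,
    show PySem.Str.upper "h1" = "H1" from by decide, show PySem.Str.upper "h2" = "H2" from by decide,
    show PySem.Str.upper "h3" = "H3" from by decide, show PySem.Str.upper "h4" = "H4" from by decide,
    show PySem.Str.upper "h5" = "H5" from by decide, show PySem.Str.upper "h6" = "H6" from by decide]
  simp [pvC, pvG, pvFil, PySem.Dict.values, add_comm]
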